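-- pv_equiv track=rewrite | github.com/lsendel/zamaz-debate | services/implementation_planner.py | _suggest_aggregates
-- ===== SOURCE A (Python) =====
-- from typing import List, Dict, Optional
--
-- def _suggest_aggregates(concepts: List[str]) -> List[str]:
--     """Suggest aggregate roots based on concepts"""
--     aggregates = []
--
--     aggregate_mappings = {
--         "test": "TestSuite",
--         "error": "ErrorReport",
--         "performance": "PerformanceProfile",
--         "module": "Module",
--         "boundary": "BoundaryDefinition",
--         "service": "ServiceDefinition"
--     }
--
--     for concept in concepts:
--         for key, aggregate in aggregate_mappings.items():
--             if key in concept.lower() and aggregate not in aggregates: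
--                 aggregates.append(aggregate)
--
--     return aggregates
-- ===== SOURCE B (Python) =====
-- from typing import List
--
-- def _suggest_aggregates(concepts: List[str]) -> List[str]:
--     """Suggest aggregate roots based on concepts"""
--     remaining = [
--         ("test", "TestSuite"),
--         ("error", "ErrorReport"),
--         ("performance", "PerformanceProfile"),
--         ("module", "Module"),
--         ("boundary", "BoundaryDefinition"),
--         ("service", "ServiceDefinition"),
--     ]
--     result = []
--     for concept in concepts:
--         if not remaining:
--             break
--         lowered = concept.lower()
--         kept = []
--         for key, aggregate in remaining:
--             if key in lowered:
--                 result.append(aggregate)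
--             else:
--                 kept.append((key, aggregate))
--         remaining = kept
--     return result
-- ===== Notes on version B (the rewrite author's own statement) =====
-- stated objective: alternative
-- what changed: B keeps a worklist of still-unmatched (key, aggregate) pairs, appends an aggregate and deletes its entry from the worklist the first time its key matches (so no membership/'not in' dedup test exists), and stops scanning concepts early once the worklist is empty.
import Mathlib
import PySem

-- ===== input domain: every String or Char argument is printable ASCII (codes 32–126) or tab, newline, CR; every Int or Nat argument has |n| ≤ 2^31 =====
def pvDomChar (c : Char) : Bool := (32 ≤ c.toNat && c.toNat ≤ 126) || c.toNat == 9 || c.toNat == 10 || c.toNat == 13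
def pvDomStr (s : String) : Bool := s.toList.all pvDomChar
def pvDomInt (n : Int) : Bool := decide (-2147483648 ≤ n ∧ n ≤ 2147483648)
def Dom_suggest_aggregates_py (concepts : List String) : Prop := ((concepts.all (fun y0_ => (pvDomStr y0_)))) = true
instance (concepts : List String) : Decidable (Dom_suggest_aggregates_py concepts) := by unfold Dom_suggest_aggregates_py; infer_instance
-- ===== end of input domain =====

-- B replaces A's accumulator-with-membership-guard by a shrinking worklist of still-unmatched
-- (key, aggregate) pairs: matched entries are deleted from the worklist (no 'not in' dedup test)
-- and the concept scan stops early once the worklist is empty; same return value (alternative decomposition).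


-- the aggregate_mappings dict literal (shared by both sources), as an insertion-ordered association list
def pvAggregateMappings : List (String × String) :=
  [("test", "TestSuite"), ("error", "ErrorReport"), ("performance", "PerformanceProfile"),
   ("module", "Module"), ("boundary", "BoundaryDefinition"), ("service", "ServiceDefinition")]

-- ===== PORT A =====
def suggest_aggregates_py (concepts : List String) : List String :=
  concepts.foldl (fun aggregates concept =>
    pvAggregateMappings.foldl (fun aggs ka =>
      if PySem.Str.isIn ka.1 (PySem.Str.lower concept) && !(aggs.contains ka.2)
      then aggs ++ [ka.2] else aggs) aggregates) []

-- ===== PORT B =====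
-- the inner 'for key, aggregate in remaining' loop of Source B: appends matches to result, keeps the rest
def pvAltPass (concept : String) (rem : List (String × String)) (res : List String) :
    List String × List (String × String) :=
  rem.foldl (fun p ka =>
    if PySem.Str.isIn ka.1 (PySem.Str.lower concept)
    then (p.1 ++ [ka.2], p.2) else (p.1, p.2 ++ [ka])) (res, [])

-- the outer 'for concept in concepts' loop of Source B with its early break on an empty worklist
def pvAltLoop : List String → List (String × String) → List String → List String
  | [], _, res => res
  | c :: cs, rem, res =>
    if rem.isEmpty then res
    else
      let p := pvAltPass c rem res
      pvAltLoop cs p.2 p.1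

def suggest_aggregates_py_alt (concepts : List String) : List String :=
  pvAltLoop concepts pvAggregateMappings []

-- ===== PRECONDITION & SPEC =====
def Spec_suggest_aggregates_py (concepts : List String) (out : List String) : Prop := out = suggest_aggregates_py_alt concepts
instance (concepts : List String) (out : List String) : Decidable (Spec_suggest_aggregates_py concepts out) := by unfold Spec_suggest_aggregates_py; infer_instance

-- ===== CLAIM (what is proved, stated in full; the proofs are below) =====
def Claim_equal_suggest_aggregates_py : Prop := ∀ (concepts : List String), Dom_suggest_aggregates_py concepts → Spec_suggest_aggregates_py concepts (suggest_aggregates_py concepts)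

-- ===== LEMMAS AND PROOFS =====

-- match test shared by both programs (definitionally the guard both ports use)
def pvMt (c : String) (ka : String × String) : Bool := PySem.Str.isIn ka.1 (PySem.Str.lower c)

-- B's pass over the worklist, characterised
lemma pv_pass_general (c : String) :
    ∀ (rem : List (String × String)) (res : List String) (pend : List (String × String)),
      rem.foldl (fun p ka =>
        if PySem.Str.isIn ka.1 (PySem.Str.lower c)
        then (p.1 ++ [ka.2], p.2) else (p.1, p.2 ++ [ka])) (res, pend)
      = (res ++ (rem.filter (pvMt c)).map Prod.snd, pend ++ rem.filter (fun ka => !pvMt c ka)) := by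
  intro rem
  induction rem with
  | nil => intro res pend; simp
  | cons ka rem ih =>
    intro res pend
    by_cases h : PySem.Str.isIn ka.1 (PySem.Str.lower c) = true
    · simp only [List.foldl_cons, List.filter_cons, pvMt, h, if_true,
        Bool.not_true, Bool.false_eq_true, if_false]
      rw [ih]; simp [pvMt, PySem.Str.isIn, PySem.Str.lower]
    · simp only [List.foldl_cons, List.filter_cons, pvMt, h, ite_false]
      simp only [Bool.not_eq_true] at h
      simp only [h, Bool.not_false, if_true, Bool.false_eq_true, if_false]
      rw [ih]; simp [pvMt, PySem.Str.isIn, PySem.Str.lower]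

lemma pv_pass_eq (c : String) (rem : List (String × String)) (res : List String) :
    pvAltPass c rem res
      = (res ++ (rem.filter (pvMt c)).map Prod.snd, rem.filter (fun ka => !pvMt c ka)) := by
  have h := pv_pass_general c rem res []
  simpa [pvAltPass] using h

-- A's inner fold over the mapping, characterised (needs distinct aggregate values)
lemma pv_inner_eq (c : String) :
    ∀ (m : List (String × String)) (res : List String), (m.map Prod.snd).Nodup →
      m.foldl (fun aggs ka =>
        if PySem.Str.isIn ka.1 (PySem.Str.lower c) && !(aggs.contains ka.2)
        then aggs ++ [ka.2] else aggs) res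
      = res ++ (m.filter (fun ka => pvMt c ka && !(res.contains ka.2))).map Prod.snd := by
  intro m
  induction m with
  | nil => intro res _; simp
  | cons ka m ih =>
    intro res hnd
    simp only [List.map_cons, List.nodup_cons, List.mem_map] at hnd
    obtain ⟨hka, hnd'⟩ := hnd
    by_cases h1 : PySem.Str.isIn ka.1 (PySem.Str.lower c) = true
    · by_cases h2 : res.contains ka.2 = true
      · simp only [List.foldl_cons, List.filter_cons, pvMt, h1, h2, Bool.not_true,
          Bool.and_false, Bool.false_eq_true, if_false]
        exact ih res hnd'
      · simp only [Bool.not_eq_true] at h2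
        simp only [List.foldl_cons, List.filter_cons, pvMt, h1, h2, Bool.not_false,
          Bool.and_true, if_true]
        rw [ih (res ++ [ka.2]) hnd']
        have hcongr : (m.filter fun kb => pvMt c kb && !((res ++ [ka.2]).contains kb.2))
            = m.filter fun kb => pvMt c kb && !(res.contains kb.2) := by
          apply List.filter_congr
          intro kb hkb
          have hne : kb.2 ≠ ka.2 := by
            intro he; exact hka ⟨kb, hkb, he⟩
          simp [hne]
        rw [hcongr]; simp [pvMt, PySem.Str.isIn, PySem.Str.lower]
    · simp only [List.foldl_cons, List.filter_cons, pvMt, h1, Bool.false_and,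
        Bool.false_eq_true, if_false]
      exact ih res hnd'

-- main loop invariant: B's worklist is exactly the mapping entries whose aggregate is not yet in the result
lemma pv_loop_eq :
    ∀ (cs : List String) (res : List String),
      cs.foldl (fun aggregates concept =>
        pvAggregateMappings.foldl (fun aggs ka =>
          if PySem.Str.isIn ka.1 (PySem.Str.lower concept) && !(aggs.contains ka.2)
          then aggs ++ [ka.2] else aggs) aggregates) res
      = pvAltLoop cs (pvAggregateMappings.filter (fun ka => !(res.contains ka.2))) res := by
  intro cs
  induction cs with
  | nil => intro res; rfl
  | cons c cs ih =>
    intro res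
    have hnd : (pvAggregateMappings.map Prod.snd).Nodup := by decide
    have hinj : ∀ a ∈ pvAggregateMappings, ∀ b ∈ pvAggregateMappings, a.2 = b.2 → a = b := by decide
    rw [List.foldl_cons]
    rw [pv_inner_eq c pvAggregateMappings res hnd]
    by_cases hrem : pvAggregateMappings.filter (fun ka => !(res.contains ka.2)) = []
    · -- worklist empty: nothing can be added any more on either side
      have hall : ∀ ka ∈ pvAggregateMappings, res.contains ka.2 = true := by
        intro ka hka
        by_contra hc
        have hmem : ka ∈ pvAggregateMappings.filter (fun ka => !(res.contains ka.2)) := by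
          rw [List.mem_filter]
          refine ⟨hka, ?_⟩
          simp only [Bool.not_eq_true] at hc
          rw [hc]
          rfl
        rw [hrem] at hmem
        exact absurd hmem (List.not_mem_nil)
      have hfil : pvAggregateMappings.filter (fun ka => pvMt c ka && !(res.contains ka.2)) = [] := by
        apply List.filter_eq_nil_iff.mpr
        intro ka hka
        rw [hall ka hka]
        simp
      rw [hfil]
      simp only [List.map_nil, List.append_nil]
      rw [ih res, hrem]
      cases cs <;> rfl
    · -- worklist nonempty: one pass of B matches one concept-step of A
      have hQ1 : pvAggregateMappings.filter (fun ka => pvMt c ka && !(res.contains ka.2))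
          = (pvAggregateMappings.filter (fun ka => !(res.contains ka.2))).filter (pvMt c) := by
        rw [List.filter_filter]
      have hAlt : pvAltLoop (c :: cs) (pvAggregateMappings.filter (fun ka => !(res.contains ka.2))) res
          = pvAltLoop cs
              ((pvAggregateMappings.filter (fun ka => !(res.contains ka.2))).filter (fun ka => !pvMt c ka))
              (res ++ ((pvAggregateMappings.filter (fun ka => !(res.contains ka.2))).filter (pvMt c)).map Prod.snd) := by
        simp only [pvAltLoop]
        rw [if_neg (by simpa [List.isEmpty_iff] using hrem)]
        rw [pv_pass_eq]
      rw [hAlt, hQ1]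
      have hinv : pvAggregateMappings.filter (fun ka =>
            !((res ++ ((pvAggregateMappings.filter (fun kb => !(res.contains kb.2))).filter (pvMt c)).map Prod.snd).contains ka.2))
          = (pvAggregateMappings.filter (fun ka => !(res.contains ka.2))).filter (fun ka => !pvMt c ka) := by
        conv_rhs => rw [List.filter_filter]
        apply List.filter_congr
        intro ka hka
        have hiff : (ka.2 ∈ ((pvAggregateMappings.filter (fun kb => !(res.contains kb.2))).filter (pvMt c)).map Prod.snd)
            ↔ (ka.2 ∉ res ∧ pvMt c ka = true) := by
          constructor
          · intro hm
            rw [List.mem_map] at hm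
            obtain ⟨kb, hkb, hkb2⟩ := hm
            rw [List.mem_filter] at hkb
            obtain ⟨hkb1, hkbm⟩ := hkb
            rw [List.mem_filter] at hkb1
            obtain ⟨hkbM, hkbr⟩ := hkb1
            have hEq : kb = ka := hinj kb hkbM ka hka hkb2
            subst hEq
            refine ⟨?_, hkbm⟩
            simpa using hkbr
          · rintro ⟨h1, h2⟩
            rw [List.mem_map]
            refine ⟨ka, ?_, rfl⟩
            rw [List.mem_filter, List.mem_filter]
            refine ⟨⟨hka, ?_⟩, h2⟩
            simpa using h1
        set L := ((pvAggregateMappings.filter (fun kb => !(res.contains kb.2))).filter (pvMt c)).map Prod.snd with hL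
        clear_value L
        by_cases hm : ka.2 ∈ res
        · have hnm : ka.2 ∉ L := fun hmm => (hiff.mp hmm).1 hm
          simp [List.mem_append, hm, hnm]
        · by_cases hmt : pvMt c ka = true
          · have hmem2 : ka.2 ∈ L := hiff.mpr ⟨hm, hmt⟩
            simp [List.mem_append, hm, hmt, hmem2]
          · have hnm : ka.2 ∉ L := fun hmm => hmt (hiff.mp hmm).2
            rw [Bool.not_eq_true] at hmt
            simp [List.mem_append, hm, hmt, hnm]
      rw [← hinv]
      exact ih _

-- ===== VERDICT (by name: the statement is the Claim_ definition above) =====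
theorem suggest_aggregates_py_spec : Claim_equal_suggest_aggregates_py := by
  intro concepts _
  unfold Spec_suggest_aggregates_py suggest_aggregates_py suggest_aggregates_py_alt
  have h := pv_loop_eq concepts []
  simpa using h
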